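-- pv_equiv track=rewrite | github.com/jurjsorinliviu/Transferable-Structural-Search-for-Ramsey-Graph-Construction | ramsey_reconstruct.py | infer_corrections_from_adjacency
-- ===== SOURCE A (Python) =====
-- def empty_graph(n: int) -> list[list[int]]:
--     return [[0 for _ in range(n)] for _ in range(n)]
--
-- def add_circulant_shift(adjacency: list[list[int]], shift: int) -> None:
--     n = len(adjacency)
--     for i in range(n):
--         j = (i + shift) % n
--         if i == j:
--             continue
--         adjacency[i][j] = 1
--         adjacency[j][i] = 1
--
-- def graph_from_shifts(n: int, shifts: list[int] | set[int]) -> list[list[int]]: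
--     adjacency = empty_graph(n)
--     for shift in sorted(set(shifts)):
--         if 0 < shift <= n // 2:
--             add_circulant_shift(adjacency, shift)
--     return adjacency
--
-- def infer_corrections_from_adjacency(
--     adjacency: list[list[int]],
--     shifts: list[int] | set[int],
-- ) -> list[tuple[int, int]]:
--     base = graph_from_shifts(len(adjacency), shifts)
--     corrections: list[tuple[int, int]] = []
--     for i in range(len(adjacency)):
--         for j in range(i + 1, len(adjacency)):
--             if adjacency[i][j] != base[i][j]:
--                 corrections.append((i, j))
--     return corrections
-- ===== SOURCE B (Python) =====
-- def infer_corrections_from_adjacency(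
--     adjacency: list[list[int]],
--     shifts: list[int] | set[int],
-- ) -> list[tuple[int, int]]:
--     n = len(adjacency)
--     half = n // 2
--     valid = {s for s in set(shifts) if 0 < s <= half}
--     corrections: list[tuple[int, int]] = []
--     for i in range(n):
--         row = adjacency[i]
--         for j in range(i + 1, n):
--             d = j - i
--             base = 1 if (d in valid or n - d in valid) else 0
--             if row[j] != base:
--                 corrections.append((i, j))
--     return corrections
-- ===== Notes on version B (the rewrite author's own statement) =====
-- stated objective: simpler
-- what changed: B drops A's build-then-compare two-phase structure: instead of materialising the n-by-n circulant base matrix via repeated shift insertions and then diffing it, B computes the valid-shift set once and decides each pair's base value arithmetically (d or n-d in the set) in a single pass over pairs, using O(s) instead of O(n^2) extra space.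
import Mathlib
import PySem

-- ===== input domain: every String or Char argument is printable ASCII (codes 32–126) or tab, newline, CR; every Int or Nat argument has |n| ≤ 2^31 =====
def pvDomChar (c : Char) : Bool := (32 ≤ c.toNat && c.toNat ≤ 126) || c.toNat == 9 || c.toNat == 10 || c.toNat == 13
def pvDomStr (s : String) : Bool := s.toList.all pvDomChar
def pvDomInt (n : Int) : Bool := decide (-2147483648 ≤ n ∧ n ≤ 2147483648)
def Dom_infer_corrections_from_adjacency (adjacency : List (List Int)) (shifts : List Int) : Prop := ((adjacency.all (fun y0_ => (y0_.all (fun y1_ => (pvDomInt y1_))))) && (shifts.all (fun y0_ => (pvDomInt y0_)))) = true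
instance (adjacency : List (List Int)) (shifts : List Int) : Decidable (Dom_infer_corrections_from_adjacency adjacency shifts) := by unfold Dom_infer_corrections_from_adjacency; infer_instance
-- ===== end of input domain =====

-- ===== PORT A =====
-- helper: empty_graph(n)
def pvEmptyGraph (n : Int) : List (List Int) :=
  (PySem.List.pyRange 0 n 1).map (fun _ => (PySem.List.pyRange 0 n 1).map (fun _ => (0 : Int)))

-- helper: add_circulant_shift (Python mutates in place; ported as returning the updated matrix).
-- Indices i and j = (i+shift) % n are provably in [0, n), so pySetD/pyGetD are exact here.
def pvAddCirculantShift (M : List (List Int)) (shift : Int) : List (List Int) :=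
  let n : Int := M.length
  (PySem.List.pyRange 0 n 1).foldl (fun A i =>
    let j := PySem.Int.mod (i + shift) n
    if i = j then A
    else
      let A1 := PySem.List.pySetD A i (PySem.List.pySetD (PySem.List.pyGetD A i []) j 1)
      PySem.List.pySetD A1 j (PySem.List.pySetD (PySem.List.pyGetD A1 j []) i 1)) M

-- helper: graph_from_shifts(n, shifts)
def pvGraphFromShifts (n : Int) (shifts : List Int) : List (List Int) :=
  (PySem.List.sorted (PySem.Set.ofList shifts) (fun x => x) false).foldl
    (fun A s => if 0 < s ∧ s ≤ PySem.Int.floordiv n 2 then pvAddCirculantShift A s else A)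
    (pvEmptyGraph n)

def infer_corrections_from_adjacency (adjacency : List (List Int)) (shifts : List Int) : List (Int × Int) :=
  let base := pvGraphFromShifts (adjacency.length : Int) shifts
  (PySem.List.pyRange 0 (adjacency.length : Int) 1).foldl (fun acc i =>
    (PySem.List.pyRange (i + 1) (adjacency.length : Int) 1).foldl (fun acc j =>
      if PySem.List.pyGetD (PySem.List.pyGetD adjacency i []) j 0 ≠
          PySem.List.pyGetD (PySem.List.pyGetD base i []) j 0
      then acc ++ [(i, j)] else acc) acc) []

-- ===== PORT B =====
-- B builds no base matrix: it filters the valid shifts once and decides each pair arithmetically.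
def infer_corrections_from_adjacency_alt (adjacency : List (List Int)) (shifts : List Int) : List (Int × Int) :=
  let n : Int := adjacency.length
  let half := PySem.Int.floordiv n 2
  let valid : PySem.Set Int :=
    (PySem.Set.ofList shifts).filter (fun s => decide (0 < s) && decide (s ≤ half))
  (PySem.List.pyRange 0 n 1).foldl (fun acc i =>
    let row := PySem.List.pyGetD adjacency i []
    (PySem.List.pyRange (i + 1) n 1).foldl (fun acc j =>
      let d := j - i
      let b : Int := if PySem.Set.contains valid d || PySem.Set.contains valid (n - d) then 1 else 0
      if PySem.List.pyGetD row j 0 ≠ b then acc ++ [(i, j)] else acc) acc) []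

-- ===== PRECONDITION & SPEC =====
-- Pre_ excludes exactly the inputs on which Python A raises IndexError: a row i with i+1 < n
-- that is shorter than n (A reads adjacency[i][j] for all i < j < n).
def Pre_infer_corrections_from_adjacency (adjacency : List (List Int)) (shifts : List Int) : Prop :=
  ∀ i < adjacency.length, i + 1 < adjacency.length → adjacency.length ≤ (adjacency.getD i []).length

instance (adjacency : List (List Int)) (shifts : List Int) : Decidable (Pre_infer_corrections_from_adjacency adjacency shifts) := by
  unfold Pre_infer_corrections_from_adjacency; infer_instance

def pvWitness_infer_corrections_from_adjacency : List (List Int) × List Int :=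
  ([[0, 1], [1, 0]], [1])

def Spec_infer_corrections_from_adjacency (adjacency : List (List Int)) (shifts : List Int) (out : List (Int × Int)) : Prop := out = infer_corrections_from_adjacency_alt adjacency shifts
instance (adjacency : List (List Int)) (shifts : List Int) (out : List (Int × Int)) : Decidable (Spec_infer_corrections_from_adjacency adjacency shifts out) := by unfold Spec_infer_corrections_from_adjacency; infer_instance

-- ===== CLAIM (what is proved, stated in full; the proofs are below) =====
def Claim_equal_infer_corrections_from_adjacency : Prop := ∀ (adjacency : List (List Int)) (shifts : List Int), Dom_infer_corrections_from_adjacency adjacency shifts → Pre_infer_corrections_from_adjacency adjacency shifts → Spec_infer_corrections_from_adjacency adjacency shifts (infer_corrections_from_adjacency adjacency shifts)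

-- ===== LEMMAS AND PROOFS =====

-- entry (i, j) of a matrix, as both ports read it
def pvEnt (A : List (List Int)) (i j : Int) : Int :=
  PySem.List.pyGetD (PySem.List.pyGetD A i []) j 0

-- square shape: n rows, each of length n
def pvShape (A : List (List Int)) (n : Nat) : Prop :=
  A.length = n ∧ ∀ r ∈ A, r.length = n

-- Python mod on the window [0, 2N)
theorem pvMod2 (N x : Int) (hN : 0 < N) (h0 : 0 ≤ x) (h2 : x < 2 * N) :
    PySem.Int.mod x N = if x < N then x else x - N := by
  rw [PySem.Int.mod_eq_emod_of_pos hN]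
  split_ifs with h
  · exact Int.emod_eq_of_lt h0 h
  · rw [← Int.sub_emod_right x N]
    exact Int.emod_eq_of_lt (by omega) (by omega)

-- pyGetD after pySetD, nonnegative Int indices
theorem pvGetSet {a : Type} (xs : List a) (i m : Int) (v d : a)
    (h0 : 0 ≤ i) (h : i < (xs.length : Int)) (hm0 : 0 ≤ m) :
    PySem.List.pyGetD (PySem.List.pySetD xs i v) m d =
      if m = i then v else PySem.List.pyGetD xs m d := by
  have hi : i = ((i.toNat : Nat) : Int) := by omega
  have hm : m = ((m.toNat : Nat) : Int) := by omega
  rw [hi, hm, PySem.List.pyGetD_pySetD_natCast xs i.toNat m.toNat v d (by omega)]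
  by_cases hmi : m.toNat = i.toNat
  · rw [if_pos hmi, if_pos (by omega : ((m.toNat : Nat) : Int) = ((i.toNat : Nat) : Int))]
  · rw [if_neg hmi, if_neg (by omega : ¬ ((m.toNat : Nat) : Int) = ((i.toNat : Nat) : Int))]

-- a row of a square matrix has length n
theorem pvRowLen (A : List (List Int)) (n : Nat) (hA : pvShape A n) (i : Int)
    (h0 : 0 ≤ i) (h1 : i < (n : Int)) :
    (PySem.List.pyGetD A i []).length = n := by
  have hl : (A.length : Int) = (n : Int) := by rw [hA.1]
  rw [PySem.List.pyGetD_eq_getElem A [] h0 (by omega)]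
  exact hA.2 _ (A.getElem_mem _)

-- setting one row of length n keeps the shape
theorem pvSetRow_shape (A : List (List Int)) (n : Nat) (hA : pvShape A n)
    (i : Int) (h0 : 0 ≤ i) (r : List Int) (hr : r.length = n) :
    pvShape (PySem.List.pySetD A i r) n := by
  constructor
  · rw [PySem.List.length_pySetD]; exact hA.1
  · intro r' hr'
    rw [PySem.List.pySetD_of_nonneg A r h0] at hr'
    rcases List.mem_or_eq_of_mem_set hr' with h | h
    · exact hA.2 _ h
    · rw [h]; exact hr

-- the inner-loop body of add_circulant_shift
def pvStep (n s : Int) (A : List (List Int)) (i : Int) : List (List Int) :=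
  let j := PySem.Int.mod (i + s) n
  if i = j then A
  else
    let A1 := PySem.List.pySetD A i (PySem.List.pySetD (PySem.List.pyGetD A i []) j 1)
    PySem.List.pySetD A1 j (PySem.List.pySetD (PySem.List.pyGetD A1 j []) i 1)

theorem pvStep_shape (n : Nat) (s k : Int) (A : List (List Int)) (hA : pvShape A n)
    (hk0 : 0 ≤ k) (hk1 : k < (n : Int)) :
    pvShape (pvStep (n : Int) s A k) n := by
  have hN : (0 : Int) < n := by omega
  simp only [pvStep]
  split_ifs with hkj
  · exact hA
  · have hj0 : 0 ≤ PySem.Int.mod (k + s) (n : Int) := PySem.Int.mod_nonneg (k + s) hN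
    have hj1 : PySem.Int.mod (k + s) (n : Int) < (n : Int) := PySem.Int.mod_lt (k + s) hN
    have hA1 : pvShape (PySem.List.pySetD A k
        (PySem.List.pySetD (PySem.List.pyGetD A k []) (PySem.Int.mod (k + s) (n : Int)) 1)) n := by
      refine pvSetRow_shape A n hA k hk0 _ ?_
      rw [PySem.List.length_pySetD]; exact pvRowLen A n hA k hk0 hk1
    refine pvSetRow_shape _ n hA1 _ hj0 _ ?_
    rw [PySem.List.length_pySetD]
    exact pvRowLen _ n hA1 _ hj0 hj1

theorem pvStep_entry (n : Nat) (s : Int) (hs : 0 < s) (hs2 : s ≤ PySem.Int.floordiv (n : Int) 2)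
    (A : List (List Int)) (hA : pvShape A n) (k i j : Int)
    (hk0 : 0 ≤ k) (hk1 : k < (n : Int)) (hi0 : 0 ≤ i) (hi1 : i < (n : Int))
    (hj0 : 0 ≤ j) (hj1 : j < (n : Int)) :
    pvEnt (pvStep (n : Int) s A k) i j =
      if (i = k ∧ PySem.Int.mod (i + s) (n : Int) = j) ∨
         (j = k ∧ PySem.Int.mod (j + s) (n : Int) = i) then 1 else pvEnt A i j := by
  rw [PySem.Int.floordiv_eq_ediv_of_pos (by norm_num : (0:Int) < 2)] at hs2
  have hN : (0 : Int) < n := by omega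
  have hmk : PySem.Int.mod (k + s) (n : Int) = if k + s < (n : Int) then k + s else k + s - n :=
    pvMod2 _ _ hN (by omega) (by omega)
  have hkne : ¬ (k = PySem.Int.mod (k + s) (n : Int)) := by rw [hmk]; split_ifs <;> omega
  have hE0 : 0 ≤ PySem.Int.mod (k + s) (n : Int) := PySem.Int.mod_nonneg (k + s) hN
  have hE1 : PySem.Int.mod (k + s) (n : Int) < (n : Int) := PySem.Int.mod_lt (k + s) hN
  have hA1 : pvShape (PySem.List.pySetD A k
      (PySem.List.pySetD (PySem.List.pyGetD A k []) (PySem.Int.mod (k + s) (n : Int)) 1)) n := by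
    refine pvSetRow_shape A n hA k hk0 _ ?_
    rw [PySem.List.length_pySetD]; exact pvRowLen A n hA k hk0 hk1
  simp only [pvStep]
  rw [if_neg hkne]
  unfold pvEnt
  rw [pvGetSet _ (PySem.Int.mod (k + s) (n : Int)) i _ [] hE0 (by rw [hA1.1]; exact hE1) hi0]
  have h4 : PySem.List.pyGetD (PySem.List.pySetD A k
        (PySem.List.pySetD (PySem.List.pyGetD A k []) (PySem.Int.mod (k + s) (n : Int)) 1))
        (PySem.Int.mod (k + s) (n : Int)) [] =
      PySem.List.pyGetD A (PySem.Int.mod (k + s) (n : Int)) [] := by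
    rw [pvGetSet A k _ _ [] hk0 (by rw [hA.1]; exact hk1) hE0,
      if_neg (fun h => hkne h.symm)]
  by_cases hiE : i = PySem.Int.mod (k + s) (n : Int)
  · rw [if_pos hiE, h4,
      pvGetSet _ k j 1 0 hk0 (by rw [pvRowLen A n hA _ hE0 hE1]; exact hk1) hj0]
    by_cases hjk : j = k
    · rw [if_pos hjk,
        if_pos (Or.inr ⟨hjk, by rw [hjk]; exact hiE.symm⟩)]
    · rw [if_neg hjk, if_neg ?_, hiE]
      rintro (⟨hik, _⟩ | ⟨hjk', _⟩)
      · exact hkne (hik.symm.trans hiE)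
      · exact hjk hjk'
  · rw [if_neg hiE,
      pvGetSet A k i _ [] hk0 (by rw [hA.1]; exact hk1) hi0]
    by_cases hik : i = k
    · rw [if_pos hik,
        pvGetSet _ (PySem.Int.mod (k + s) (n : Int)) j 1 0 hE0
          (by rw [pvRowLen A n hA k hk0 hk1]; exact hE1) hj0]
      by_cases hjE : j = PySem.Int.mod (k + s) (n : Int)
      · rw [if_pos hjE, if_pos (Or.inl ⟨hik, by rw [hik]; exact hjE.symm⟩)]
      · rw [if_neg hjE, if_neg ?_, hik]
        rintro (⟨_, hmieq⟩ | ⟨hjk', hmjeq⟩)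
        · rw [hik] at hmieq; exact hjE hmieq.symm
        · rw [hjk'] at hmjeq; exact hiE hmjeq.symm
    · rw [if_neg hik, if_neg ?_]
      rintro (⟨hik', _⟩ | ⟨hjk', hmjeq⟩)
      · exact hik hik'
      · rw [hjk'] at hmjeq; exact hiE hmjeq.symm

theorem pvLoop_shape (n : Nat) (s : Int) (ks : List Int) (A : List (List Int)) (hA : pvShape A n)
    (hks : ∀ k ∈ ks, 0 ≤ k ∧ k < (n : Int)) :
    pvShape (ks.foldl (pvStep (n : Int) s) A) n := by
  induction ks generalizing A with
  | nil => exact hA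
  | cons k ks ih =>
    simp only [List.foldl_cons]
    have hk := hks k (List.mem_cons_self ..)
    exact ih _ (pvStep_shape n s k A hA hk.1 hk.2)
      (fun k' hk' => hks k' (List.mem_cons_of_mem _ hk'))

theorem pvLoop_entry (n : Nat) (s : Int) (hs : 0 < s) (hs2 : s ≤ PySem.Int.floordiv (n : Int) 2)
    (ks : List Int) (A : List (List Int)) (hA : pvShape A n) (i j : Int)
    (hks : ∀ k ∈ ks, 0 ≤ k ∧ k < (n : Int))
    (hi0 : 0 ≤ i) (hi1 : i < (n : Int)) (hj0 : 0 ≤ j) (hj1 : j < (n : Int)) :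
    pvEnt (ks.foldl (pvStep (n : Int) s) A) i j =
      if (i ∈ ks ∧ PySem.Int.mod (i + s) (n : Int) = j) ∨
         (j ∈ ks ∧ PySem.Int.mod (j + s) (n : Int) = i) then 1 else pvEnt A i j := by
  induction ks generalizing A with
  | nil => simp
  | cons k ks ih =>
    simp only [List.foldl_cons]
    have hk := hks k (List.mem_cons_self ..)
    rw [ih (pvStep (n : Int) s A k)
      (pvStep_shape n s k A hA hk.1 hk.2)
      (fun k' hk' => hks k' (List.mem_cons_of_mem _ hk'))]
    rw [pvStep_entry n s hs hs2 A hA k i j hk.1 hk.2 hi0 hi1 hj0 hj1]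
    simp only [List.mem_cons]
    split_ifs <;> tauto

theorem pvAdd_eq_loop (n : Nat) (s : Int) (A : List (List Int)) (hA : pvShape A n) :
    pvAddCirculantShift A s = (PySem.List.pyRange 0 (n : Int) 1).foldl (pvStep (n : Int) s) A := by
  simp only [pvAddCirculantShift, hA.1]
  rfl

theorem pvAdd_shape (n : Nat) (s : Int) (A : List (List Int)) (hA : pvShape A n) :
    pvShape (pvAddCirculantShift A s) n := by
  rw [pvAdd_eq_loop n s A hA]
  exact pvLoop_shape n s _ A hA (fun k hk => by
    have := PySem.List.mem_pyRange_one.mp hk; omega)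

theorem pvAdd_entry (n : Nat) (s : Int) (hs : 0 < s) (hs2 : s ≤ PySem.Int.floordiv (n : Int) 2)
    (A : List (List Int)) (hA : pvShape A n) (i j : Int)
    (hi0 : 0 ≤ i) (hi1 : i < (n : Int)) (hj0 : 0 ≤ j) (hj1 : j < (n : Int)) :
    pvEnt (pvAddCirculantShift A s) i j =
      if PySem.Int.mod (i + s) (n : Int) = j ∨ PySem.Int.mod (j + s) (n : Int) = i
      then 1 else pvEnt A i j := by
  rw [pvAdd_eq_loop n s A hA,
    pvLoop_entry n s hs hs2 _ A hA i j (fun k hk => by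
      have := PySem.List.mem_pyRange_one.mp hk; omega) hi0 hi1 hj0 hj1]
  have hi : i ∈ PySem.List.pyRange 0 (n : Int) 1 := PySem.List.mem_pyRange_one.mpr (by omega)
  have hj : j ∈ PySem.List.pyRange 0 (n : Int) 1 := PySem.List.mem_pyRange_one.mpr (by omega)
  split_ifs <;> tauto

theorem pvGraphFold_entry (n : Nat) (L : List Int) (A : List (List Int)) (hA : pvShape A n)
    (i j : Int) (hi0 : 0 ≤ i) (hi1 : i < (n : Int)) (hj0 : 0 ≤ j) (hj1 : j < (n : Int)) :
    pvEnt (L.foldl (fun A s => if 0 < s ∧ s ≤ PySem.Int.floordiv (n : Int) 2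
        then pvAddCirculantShift A s else A) A) i j =
      if ∃ s ∈ L, (0 < s ∧ s ≤ PySem.Int.floordiv (n : Int) 2) ∧
          (PySem.Int.mod (i + s) (n : Int) = j ∨ PySem.Int.mod (j + s) (n : Int) = i)
      then 1 else pvEnt A i j := by
  induction L generalizing A with
  | nil => simp
  | cons s L ih =>
    simp only [List.foldl_cons, List.exists_mem_cons_iff]
    by_cases hv : 0 < s ∧ s ≤ PySem.Int.floordiv (n : Int) 2
    · rw [if_pos hv, ih _ (pvAdd_shape n s A hA),
        pvAdd_entry n s hv.1 hv.2 A hA i j hi0 hi1 hj0 hj1]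
      by_cases h1 : ∃ t ∈ L, (0 < t ∧ t ≤ PySem.Int.floordiv (n : Int) 2) ∧
          (PySem.Int.mod (i + t) (n : Int) = j ∨ PySem.Int.mod (j + t) (n : Int) = i)
      · rw [if_pos h1, if_pos (Or.inr h1)]
      · rw [if_neg h1]
        by_cases h2 : PySem.Int.mod (i + s) (n : Int) = j ∨ PySem.Int.mod (j + s) (n : Int) = i
        · rw [if_pos h2, if_pos (Or.inl ⟨hv, h2⟩)]
        · rw [if_neg h2, if_neg ?_]
          rintro (hPs | hL)
          · exact h2 hPs.2
          · exact h1 hL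
    · rw [if_neg hv, ih A hA]
      by_cases h1 : ∃ t ∈ L, (0 < t ∧ t ≤ PySem.Int.floordiv (n : Int) 2) ∧
          (PySem.Int.mod (i + t) (n : Int) = j ∨ PySem.Int.mod (j + t) (n : Int) = i)
      · rw [if_pos h1, if_pos (Or.inr h1)]
      · rw [if_neg h1, if_neg ?_]
        rintro (hPs | hL)
        · exact hv hPs.1
        · exact h1 hL

theorem pvEmpty_shape (n : Nat) : pvShape (pvEmptyGraph (n : Int)) n := by
  constructor
  · simp [pvEmptyGraph, PySem.List.length_pyRange_one]
  · intro r hr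
    simp only [pvEmptyGraph, List.mem_map] at hr
    obtain ⟨x, _, hx⟩ := hr
    rw [← hx]
    simp [PySem.List.length_pyRange_one]

theorem pvEmpty_entry (n : Nat) (i j : Int)
    (hi0 : 0 ≤ i) (hi1 : i < (n : Int)) (hj0 : 0 ≤ j) (hj1 : j < (n : Int)) :
    pvEnt (pvEmptyGraph (n : Int)) i j = 0 := by
  unfold pvEnt pvEmptyGraph
  rw [PySem.List.pyGetD_map_pyRange_of_nonneg _ _ _ _ hi0 hi1,
    PySem.List.pyGetD_map_pyRange_of_nonneg _ _ _ _ hj0 hj1]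

-- the pair condition: A's base-matrix entry equals B's arithmetic 0/1 value
theorem pvBase_entry (n : Nat) (shifts : List Int) (i j : Int)
    (hi0 : 0 ≤ i) (hij : i < j) (hj1 : j < (n : Int)) :
    pvEnt (pvGraphFromShifts (n : Int) shifts) i j =
      (if PySem.Set.contains ((PySem.Set.ofList shifts).filter
            (fun s => decide (0 < s) && decide (s ≤ PySem.Int.floordiv (n : Int) 2))) (j - i) ||
          PySem.Set.contains ((PySem.Set.ofList shifts).filter
            (fun s => decide (0 < s) && decide (s ≤ PySem.Int.floordiv (n : Int) 2))) ((n : Int) - (j - i))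
       then (1 : Int) else 0) := by
  have hN : (0 : Int) < n := by omega
  unfold pvGraphFromShifts
  rw [pvGraphFold_entry n _ _ (pvEmpty_shape n) i j hi0 (by omega) (by omega) hj1,
    pvEmpty_entry n i j hi0 (by omega) (by omega) hj1]
  refine if_congr ?_ rfl rfl
  have hfd : PySem.Int.floordiv (n : Int) 2 = (n : Int) / 2 :=
    PySem.Int.floordiv_eq_ediv_of_pos (by norm_num)
  have hmemv : ∀ x : Int, (PySem.Set.contains ((PySem.Set.ofList shifts).filter
      (fun s => decide (0 < s) && decide (s ≤ PySem.Int.floordiv (n : Int) 2))) x = true)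
      ↔ (x ∈ shifts ∧ 0 < x ∧ x ≤ (n : Int) / 2) := by
    intro x
    rw [PySem.Set.contains_iff, List.mem_filter, PySem.Set.mem_ofList, hfd]
    simp
  constructor
  · rintro ⟨s, hsmem, ⟨hs0, hs2⟩, hcond⟩
    rw [PySem.List.mem_sorted, PySem.Set.mem_ofList] at hsmem
    rw [hfd] at hs2
    rw [pvMod2 (n : Int) (i + s) hN (by omega) (by omega),
      pvMod2 (n : Int) (j + s) hN (by omega) (by omega)] at hcond
    simp only [Bool.or_eq_true]
    rcases hcond with h | h
    · left
      rw [hmemv]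
      split_ifs at h with hc
      · exact ⟨by rwa [show j - i = s by omega], by omega, by omega⟩
      · exfalso; omega
    · right
      rw [hmemv]
      split_ifs at h with hc
      · exfalso; omega
      · exact ⟨by rwa [show (n : Int) - (j - i) = s by omega], by omega, by omega⟩
  · intro h
    simp only [Bool.or_eq_true, hmemv] at h
    rcases h with ⟨hmem, h0, h2⟩ | ⟨hmem, h0, h2⟩
    · refine ⟨j - i, ?_, ⟨by omega, by rw [hfd]; omega⟩, Or.inl ?_⟩
      · rw [PySem.List.mem_sorted, PySem.Set.mem_ofList]; exact hmem
      · rw [pvMod2 (n : Int) (i + (j - i)) hN (by omega) (by omega)]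
        split_ifs <;> omega
    · refine ⟨(n : Int) - (j - i), ?_, ⟨by omega, by rw [hfd]; omega⟩, Or.inr ?_⟩
      · rw [PySem.List.mem_sorted, PySem.Set.mem_ofList]; exact hmem
      · rw [pvMod2 (n : Int) (j + ((n : Int) - (j - i))) hN (by omega) (by omega)]
        split_ifs <;> omega

-- ===== VERDICT (by name: the statement is the Claim_ definition above) =====
theorem infer_corrections_from_adjacency_spec : Claim_equal_infer_corrections_from_adjacency := by
  unfold Claim_equal_infer_corrections_from_adjacency
  intro adjacency shifts _ _
  unfold Spec_infer_corrections_from_adjacency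
  simp only [infer_corrections_from_adjacency, infer_corrections_from_adjacency_alt]
  apply PySem.List.foldl_congr_mem
  intro acc i hi
  apply PySem.List.foldl_congr_mem
  intro acc2 j hj
  have hi' := PySem.List.mem_pyRange_one.mp hi
  have hj' := PySem.List.mem_pyRange_one.mp hj
  have hbase := pvBase_entry adjacency.length shifts i j (by omega) (by omega) (by omega)
  unfold pvEnt at hbase
  rw [hbase]
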